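-- pv_equiv track=rewrite | github.com/Achille981/Collatz | fonctions.py | suivantImpaire
-- ===== SOURCE A (Python) =====
-- def suivantImpaire(n: int):
--     """
--     Calcule le nombre impair qui suit n dans la suite de Collatz.
--     """
--     if isinstance(n, int) and n > 0:
--         if n % 2 == 1:
--             m = 3 * n + 1
--             while m % 2 == 0:
--                 m //= 2
--         else:
--             while n % 2 == 0:
--                 n //= 2
--             m = n
--         return m
--     else:
--         raise ValueError("n doit être un entier positif")
-- ===== SOURCE B (Python) =====
-- def suivantImpaire(n: int):
--     """
--     Calcule le nombre impair qui suit n dans la suite de Collatz.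
--     """
--     if isinstance(n, int) and n > 0:
--         m = 3 * n + 1 if n % 2 == 1 else n
--         tz = (m & -m).bit_length() - 1   # number of trailing zero bits of m
--         return m >> tz
--     raise ValueError("n doit être un entier positif")
-- ===== Notes on version B (the rewrite author's own statement) =====
-- stated objective: alternative
-- what changed: The iterative divide-by-two while loops are replaced by one closed-form step: compute the single candidate m (3n+1 if n is odd, else n) and strip all factors of two at once with a trailing-zero count via the m & -m bit trick and one shift.
import Mathlib
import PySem

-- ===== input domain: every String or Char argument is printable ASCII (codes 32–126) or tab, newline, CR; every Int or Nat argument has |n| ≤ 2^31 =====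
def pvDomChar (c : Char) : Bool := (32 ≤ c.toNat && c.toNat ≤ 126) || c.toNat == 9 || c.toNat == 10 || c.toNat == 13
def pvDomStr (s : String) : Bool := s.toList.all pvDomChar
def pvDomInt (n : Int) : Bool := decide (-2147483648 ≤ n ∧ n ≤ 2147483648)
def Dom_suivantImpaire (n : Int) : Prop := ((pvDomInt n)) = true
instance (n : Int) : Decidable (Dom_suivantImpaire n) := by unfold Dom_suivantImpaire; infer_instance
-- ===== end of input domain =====

-- B replaces A's iterative divide-by-two while loops by a single candidate m and one
-- closed-form strip of all factors of two (trailing-zero count via m & -m, one shift);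
-- objective: alternative algorithm, same cost class in practice.

-- ===== PORT A =====
-- A's 'while m % 2 == 0: m //= 2'; the '0 < m' guard only makes the recursion total
-- (inside Pre_ the loop variable is always positive, so the guard never changes the value).
def stripTwosA (m : Int) : Int :=
  if _hg : 0 < m ∧ PySem.Int.mod m 2 = 0 then
    stripTwosA (PySem.Int.floordiv m 2)
  else m
termination_by m.toNat
decreasing_by
  rw [PySem.Int.floordiv_eq_ediv_of_pos (by omega)]
  omega

def suivantImpaire (n : Int) : Int :=
  if n > 0 then
    if PySem.Int.mod n 2 = 1 then stripTwosA (3 * n + 1)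
    else stripTwosA n
  else 0  -- Python raises ValueError here; excluded by Pre_

-- ===== PORT B =====
def suivantImpaire_alt (n : Int) : Int :=
  if n > 0 then
    let m : Int := if PySem.Int.mod n 2 = 1 then 3 * n + 1 else n
    let tz : Int := (PySem.Int.bitLength (PySem.Int.band m (-m)) : Int) - 1
    m >>> tz.toNat  -- m >>= tz; tz ≥ 0 whenever m > 0
  else 0  -- Python raises ValueError here; excluded by Pre_

-- ===== PRECONDITION & SPEC =====
-- Pre_ excludes exactly the inputs n ≤ 0 on which A raises ValueError.
def Pre_suivantImpaire (n : Int) : Prop := 0 < n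
instance (n : Int) : Decidable (Pre_suivantImpaire n) := by unfold Pre_suivantImpaire; infer_instance
def pvWitness_suivantImpaire : Int := 7

def Spec_suivantImpaire (n : Int) (out : Int) : Prop := out = suivantImpaire_alt n
instance (n : Int) (out : Int) : Decidable (Spec_suivantImpaire n out) := by unfold Spec_suivantImpaire; infer_instance

-- ===== CLAIM (what is proved, stated in full; the proofs are below) =====
def Claim_equal_suivantImpaire : Prop := ∀ (n : Int), Dom_suivantImpaire n → Pre_suivantImpaire n → Spec_suivantImpaire n (suivantImpaire n)

-- ===== LEMMAS AND PROOFS =====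

-- a odd: a AND (a-1) clears only the low bit
lemma nat_and_pred_of_odd (a : Nat) (h : a % 2 = 1) : a &&& (a - 1) = a - 1 := by
  apply Nat.eq_of_testBit_eq
  intro i
  cases i with
  | zero => simp [Nat.testBit_zero]; omega
  | succ i =>
      have hdiv : a / 2 = (a - 1) / 2 := by omega
      simp [Nat.testBit_succ, Nat.and_div_two, hdiv]

-- a even: a AND (a-1) is twice (a/2) AND (a/2 - 1)
lemma nat_and_pred_of_even (k : Nat) (h : 0 < k) :
    (2 * k) &&& (2 * k - 1) = 2 * (k &&& (k - 1)) := by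
  apply Nat.eq_of_testBit_eq
  intro i
  cases i with
  | zero => simp [Nat.testBit_zero]
  | succ i =>
      rw [Nat.testBit_and, Nat.testBit_succ, Nat.testBit_succ, Nat.testBit_succ]
      have h1 : 2 * k / 2 = k := by omega
      have h2 : (2 * k - 1) / 2 = k - 1 := by omega
      have h3 : 2 * (k &&& (k - 1)) / 2 = k &&& (k - 1) := by omega
      rw [h1, h2, h3, Nat.testBit_and]

-- PySem.Int.band a (-a) on a positive a, reduced to a Nat expression
lemma band_neg_self (a : Nat) (h : 0 < a) :
    PySem.Int.band (a : Int) (-(a : Int)) = ((a - (a &&& (a - 1)) : Nat) : Int) := by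
  have h1 : ¬ (0 ≤ -(a : Int)) := by omega
  have h2 : (-(-(a : Int)) - 1).toNat = a - 1 := by omega
  simp [PySem.Int.band]
  intro ha
  subst ha
  simp

lemma stripTwosA_even (k : Int) (h : 0 < k) :
    stripTwosA (2 * k) = stripTwosA k := by
  rw [stripTwosA]
  have hm : PySem.Int.mod (2 * k) 2 = 0 := by
    rw [PySem.Int.mod_eq_emod_of_pos (by omega)]; omega
  have hd : PySem.Int.floordiv (2 * k) 2 = k := by
    rw [PySem.Int.floordiv_eq_ediv_of_pos (by omega)]; omega
  rw [dif_pos ⟨by omega, hm⟩, hd]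

lemma stripTwosA_odd (m : Int) (h : PySem.Int.mod m 2 ≠ 0) : stripTwosA m = m := by
  rw [stripTwosA, dif_neg (fun hc => h hc.2)]

-- core invariant: on a positive input, A's loop-stripping equals B's single shift,
-- and m & -m is the corresponding power of two
lemma strip_eq_shift (a : Nat) (h : 0 < a) :
    ∃ t : Nat, PySem.Int.band (a : Int) (-(a : Int)) = (2 : Int) ^ t ∧
      stripTwosA (a : Int) = (a : Int) >>> t := by
  induction a using Nat.strong_induction_on with
  | _ a ih =>
    rcases Nat.even_or_odd a with he | ho
    · obtain ⟨k, hk⟩ := he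
      have hk2 : a = 2 * k := by omega
      have hkpos : 0 < k := by omega
      obtain ⟨t, hband, hstrip⟩ := ih k (by omega) hkpos
      refine ⟨t + 1, ?_, ?_⟩
      · rw [band_neg_self a h, hk2, nat_and_pred_of_even k hkpos]
        rw [band_neg_self k hkpos] at hband
        have hle : k &&& (k - 1) ≤ k := Nat.and_le_left
        have h2le : 2 * (k &&& (k - 1)) ≤ 2 * k := by omega
        push_cast [hle] at hband
        push_cast [h2le]
        rw [pow_succ]; linarith
      · have hc : ((a : Nat) : Int) = 2 * (k : Int) := by push_cast [hk2]; ring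
        rw [hc, stripTwosA_even _ (by exact_mod_cast hkpos), hstrip]
        rw [Int.shiftRight_eq_div_pow, Int.shiftRight_eq_div_pow]
        rw [pow_succ]
        push_cast
        rw [mul_comm (2:Int) (k:Int), mul_comm ((2:Int)^t) 2,
          ← Int.ediv_ediv_of_nonneg (by positivity)]
        rw [Int.mul_ediv_cancel _ (by norm_num)]
    · have hmod : a % 2 = 1 := Nat.odd_iff.mp ho
      refine ⟨0, ?_, ?_⟩
      · rw [band_neg_self a h, nat_and_pred_of_odd a hmod]
        have : a - (a - 1) = 1 := by omega
        rw [this]; norm_num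
      · have hmi : PySem.Int.mod (a : Int) 2 ≠ 0 := by
          rw [PySem.Int.mod_eq_emod_of_pos (by omega)]; omega
        rw [stripTwosA_odd _ hmi, Int.shiftRight_eq_div_pow]
        norm_num

lemma bitLength_two_pow (t : Nat) : PySem.Int.bitLength ((2 : Int) ^ t) = t + 1 := by
  induction t with
  | zero => decide
  | succ t ih =>
      rw [PySem.Int.bitLength_of_pos (by positivity)]
      have : PySem.Int.floordiv ((2:Int) ^ (t+1)) 2 = 2 ^ t := by
        rw [PySem.Int.floordiv_eq_ediv_of_pos (by norm_num), pow_succ,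
          Int.mul_ediv_cancel _ (by norm_num)]
      rw [this, ih]

lemma main_eq (m : Int) (h : 0 < m) :
    stripTwosA m = m >>> ((PySem.Int.bitLength (PySem.Int.band m (-m)) : Int) - 1).toNat := by
  have hm : m = ((m.toNat : Nat) : Int) := by omega
  obtain ⟨t, hband, hstrip⟩ := strip_eq_shift m.toNat (by omega)
  rw [hm, hband, hstrip, bitLength_two_pow]
  have : ((t + 1 : Nat) : Int) - 1 = (t : Int) := by push_cast; ring
  rw [this]
  simp

-- ===== VERDICT (by name: the statement is the Claim_ definition above) =====
theorem suivantImpaire_spec : Claim_equal_suivantImpaire := by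
  intro n _ hpre
  unfold Spec_suivantImpaire suivantImpaire suivantImpaire_alt
  have hn : n > 0 := hpre
  simp only [hn, if_true]
  by_cases hodd : PySem.Int.mod n 2 = 1
  · simp only [hodd, if_true]
    exact main_eq (3 * n + 1) (by omega)
  · simp only [hodd, if_false]
    exact main_eq n hn
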